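-- pv_equiv track=rewrite | github.com/ekalksma/advent-of-code | 2022/day08/solution.py | view_left
-- ===== SOURCE A (Python) =====
-- def view_left(trees, tree_height, y, x):
--     if y == 0 or x == 0 or y == len(trees) - 1 or x == len(trees[0]) - 1:
--         return 0
--     if tree_height == trees[y][x - 1]:
--         return 1
--     if tree_height >= trees[y][x - 1]:
--         return 1 + view_left(trees, tree_height, y, x - 1)
--     else:
--         return 1
-- ===== SOURCE B (Python) =====
-- def view_left(trees, tree_height, y, x):
--     if y == 0 or x == 0 or y == len(trees) - 1 or x == len(trees[0]) - 1:
--         return 0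
--     row = trees[y]
--     dist = 0
--     cx = x
--     while cx > 0:
--         left = row[cx - 1]
--         dist += 1
--         if tree_height <= left:
--             break
--         cx -= 1
--     return dist
-- ===== Notes on version B (the rewrite author's own statement) =====
-- stated objective: idiomatic
-- what changed: Replaces A's tail recursion over the column index (with the blocked/equal/greater branch trio) by a single iterative leftward scan keeping a running distance counter and one '<=' stop test.
-- outside the precondition, e.g. on view_left([[1, 2, 3], [4, 9, 6], [7, 8, 9]], 5, 1, -1): A returns 1, B returns 0
import Mathlib
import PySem

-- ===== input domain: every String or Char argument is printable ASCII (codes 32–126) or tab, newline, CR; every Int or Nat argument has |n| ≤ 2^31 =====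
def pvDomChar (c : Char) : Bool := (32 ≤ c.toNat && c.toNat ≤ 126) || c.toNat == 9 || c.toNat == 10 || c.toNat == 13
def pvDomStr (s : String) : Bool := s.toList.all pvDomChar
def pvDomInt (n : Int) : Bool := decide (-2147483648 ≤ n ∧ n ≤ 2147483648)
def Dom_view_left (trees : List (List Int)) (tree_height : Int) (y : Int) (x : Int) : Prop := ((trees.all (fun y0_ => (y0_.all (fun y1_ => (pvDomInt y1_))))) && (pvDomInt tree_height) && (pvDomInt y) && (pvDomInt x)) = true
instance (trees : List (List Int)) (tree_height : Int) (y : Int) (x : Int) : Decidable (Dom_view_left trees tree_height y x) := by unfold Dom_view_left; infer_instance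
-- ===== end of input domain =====

-- B rewrites A's tail recursion over the column index as an iterative leftward scan with a running
-- distance counter (return-value equivalence; objective: idiomatic).

-- ===== PORT A =====
-- recursion on x, carried as a Nat (Pre_ guarantees 0 <= x); trees[0] is trees.headD [],
-- trees[y][x-1] is ported with PySem.List.pyGet? (getD 0 stands for the IndexError case, outside Pre_)
def view_left_go (trees : List (List Int)) (tree_height : Int) (y : Int) (x : Nat) : Int :=
    if y = 0 ∨ (x : Int) = 0 ∨ y = (trees.length : Int) - 1 ∨ (x : Int) = ((trees.headD []).length : Int) - 1 then 0
    else
      match x with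
      | 0 => 0  -- unreachable: (x : Int) = 0 was caught by the guard
      | x' + 1 =>
        let left := (PySem.List.pyGet? ((PySem.List.pyGet? trees y).getD []) (x' : Int)).getD 0
        if tree_height = left then 1
        else if left ≤ tree_height then 1 + view_left_go trees tree_height y x'
        else 1

def view_left (trees : List (List Int)) (tree_height : Int) (y : Int) (x : Int) : Int :=
  view_left_go trees tree_height y x.toNat

-- ===== PORT B =====
-- the while loop: cx counts down as a Nat, dist is the accumulator; row[cx-1] via PySem.List.pyGet?
def view_left_alt_go (row : List Int) (tree_height : Int) (dist : Int) : Nat → Int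
  | 0 => dist
  | Nat.succ c =>
    let left := (PySem.List.pyGet? row (c : Int)).getD 0
    if tree_height ≤ left then dist + 1
    else view_left_alt_go row tree_height (dist + 1) c

def view_left_alt (trees : List (List Int)) (tree_height : Int) (y : Int) (x : Int) : Int :=
  if y = 0 ∨ x = 0 ∨ y = (trees.length : Int) - 1 ∨ x = ((trees.headD []).length : Int) - 1 then 0
  else view_left_alt_go ((PySem.List.pyGet? trees y).getD []) tree_height 0 x.toNat

-- ===== PRECONDITION & SPEC =====
-- Pre_ admits every input on which the border guard fires (its `or` short-circuits, so wild y/x still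
-- return 0) plus in-range scans whose row is long enough; it excludes negative/out-of-range y or x in a
-- real scan, where A's value (when it does not raise IndexError) comes from Python's accidental
-- negative-index wraparound, and rows shorter than x, where A raises IndexError at trees[y][x-1].
def Pre_view_left (trees : List (List Int)) (tree_height : Int) (y : Int) (x : Int) : Prop :=
  y = 0 ∨ x = 0 ∨ y = (trees.length : Int) - 1 ∨
    (trees ≠ [] ∧ (x = ((trees.headD []).length : Int) - 1 ∨
      (0 ≤ y ∧ y < (trees.length : Int) ∧ 0 ≤ x ∧ x < ((trees.headD []).length : Int) ∧
        x ≤ ((trees.getD y.toNat []).length : Int))))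
instance (trees : List (List Int)) (tree_height : Int) (y : Int) (x : Int) : Decidable (Pre_view_left trees tree_height y x) := by unfold Pre_view_left; infer_instance

def pvWitness_view_left : List (List Int) × Int × Int × Int := ([[3, 3, 3], [3, 1, 3], [3, 3, 3]], 2, 1, 1)

def Spec_view_left (trees : List (List Int)) (tree_height : Int) (y : Int) (x : Int) (out : Int) : Prop := out = view_left_alt trees tree_height y x
instance (trees : List (List Int)) (tree_height : Int) (y : Int) (x : Int) (out : Int) : Decidable (Spec_view_left trees tree_height y x out) := by unfold Spec_view_left; infer_instance

-- ===== CLAIM (what is proved, stated in full; the proofs are below) =====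
def Claim_equal_view_left : Prop := ∀ (trees : List (List Int)) (tree_height : Int) (y : Int) (x : Int), Dom_view_left trees tree_height y x → Pre_view_left trees tree_height y x → Spec_view_left trees tree_height y x (view_left trees tree_height y x)

-- ===== LEMMAS AND PROOFS =====

-- loop invariant: away from the borders, B's scan with accumulator dist equals dist plus A's recursion
theorem alt_go_eq_go (trees : List (List Int)) (tree_height : Int) (y : Int)
    (hy0 : y ≠ 0) (hyl : y ≠ (trees.length : Int) - 1) :
    ∀ (c : Nat), (c : Int) < ((trees.headD []).length : Int) - 1 → ∀ (dist : Int),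
      view_left_alt_go ((PySem.List.pyGet? trees y).getD []) tree_height dist c
        = dist + view_left_go trees tree_height y c := by
  intro c
  induction c with
  | zero =>
    intro _ dist
    simp [view_left_alt_go, view_left_go]
  | succ c ih =>
    intro hlt dist
    have hc : (c : Int) < ((trees.headD []).length : Int) - 1 := by push_cast at hlt ⊢; omega
    have hne0 : ((Nat.succ c : Nat) : Int) ≠ 0 := by push_cast; omega
    have hnel : ((Nat.succ c : Nat) : Int) ≠ ((trees.headD []).length : Int) - 1 := by
      push_cast at hlt ⊢; omega
    rw [view_left_alt_go]
    unfold view_left_go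
    simp only [hy0, hyl, hne0, hnel, or_self, if_false, false_or]
    by_cases heq : tree_height = (PySem.List.pyGet? ((PySem.List.pyGet? trees y).getD []) (c : Int)).getD 0
    · simp [heq]
    · by_cases hle : (PySem.List.pyGet? ((PySem.List.pyGet? trees y).getD []) (c : Int)).getD 0 ≤ tree_height
      · have hnle : ¬ tree_height ≤ (PySem.List.pyGet? ((PySem.List.pyGet? trees y).getD []) (c : Int)).getD 0 := by
          omega
        simp only [heq, hle, hnle, if_false, if_true]
        rw [ih hc (dist + 1)]
        ring
      · have hle' : tree_height ≤ (PySem.List.pyGet? ((PySem.List.pyGet? trees y).getD []) (c : Int)).getD 0 := by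
          omega
        rw [if_pos hle', if_neg heq, if_neg hle]

-- ===== VERDICT (by name: the statement is the Claim_ definition above) =====
theorem view_left_spec : Claim_equal_view_left := by
  intro trees tree_height y x _ hPre
  show view_left trees tree_height y x = view_left_alt trees tree_height y x
  unfold view_left view_left_alt
  by_cases hg : y = 0 ∨ x = 0 ∨ y = (trees.length : Int) - 1 ∨ x = ((trees.headD []).length : Int) - 1
  · rw [if_pos hg]
    unfold view_left_go
    rw [if_pos]
    rcases hg with h | h | h | h
    · exact Or.inl h
    · exact Or.inr (Or.inl (by rw [h]; simp))
    · exact Or.inr (Or.inr (Or.inl h))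
    · by_cases hx0 : 0 ≤ x
      · exact Or.inr (Or.inr (Or.inr (by rw [Int.toNat_of_nonneg hx0]; exact h)))
      · have hz : x.toNat = 0 := Int.toNat_of_nonpos (le_of_lt (not_le.mp hx0))
        exact Or.inr (Or.inl (by rw [hz]; simp))
  · rw [if_neg hg]
    push_neg at hg
    obtain ⟨h1, h2, h3, h4⟩ := hg
    rcases hPre with h | h | h | ⟨_, h | ⟨hy0, hyl, hx0, hxl, _⟩⟩
    · exact absurd h h1
    · exact absurd h h2
    · exact absurd h h3
    · exact absurd h h4
    · have hxx : ((x.toNat : Nat) : Int) = x := Int.toNat_of_nonneg hx0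
      rw [alt_go_eq_go trees tree_height y h1 h3 x.toNat (by rw [hxx]; omega) 0]
      ring
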